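-- pv_equiv track=rewrite | github.com/FilipSkoro/Seminar2-FER-2022 | Program/model.py | getTrainsOnSegments
-- ===== SOURCE A (Python) =====
-- def getTrainsOnSegments(data, trains):
--
--     '''
--     This function is used for making strings that represent trains on
--     their segments and then returns it as a list. It gets two arguments;
--     'data' which is dictionary where trains are keys and lists of each trains
--     stations are values and 'trains' which is list of trains.
--     '''
--
--     trains_on_segments = []
--
--     for train in trains:
--         route = data.get(train)
--         for i in range(0, len(route)):
--             if (i != (len(route) - 1)):
--                 if (route[i] > route[i+1]):
--                     segment = route[i+1] + route[i]
--                 else: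
--                     segment = route[i] + route[i+1]
--             else:
--                 if (route[i] > route[0]):
--                     segment = route[0] + route[i]
--                 else:
--                     segment = route[i] + route[0]
--
--             segment = train + segment
--             trains_on_segments.append(segment)
--
--     return trains_on_segments
-- ===== SOURCE B (Python) =====
-- def getTrainsOnSegments(data, trains):
--     return [s for train in trains for s in _segments(train, data[train])]
--
--
-- def _segments(train, route):
--     # recursive: walk the route pairing each station with its successor,
--     # carrying the first station along for the final wrap-around pair
--     if not route:
--         return []
--     return _walk(train, route[0], route)
--
--
-- def _walk(train, first, route):
--     if len(route) == 1:
--         a, b = route[0], first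
--         return [train + (a + b if a <= b else b + a)]
--     a, b = route[0], route[1]
--     head = train + (a + b if a <= b else b + a)
--     return [head] + _walk(train, first, route[1:])
-- ===== Notes on version B (the rewrite author's own statement) =====
-- stated objective: alternative
-- what changed: B replaces A's single index loop with its last-index wrap branch by a structural recursion that walks each route pairing head with successor while carrying the first station for the final wrap pair, with per-train lists flattened by a comprehension instead of an accumulator.
import Mathlib
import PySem

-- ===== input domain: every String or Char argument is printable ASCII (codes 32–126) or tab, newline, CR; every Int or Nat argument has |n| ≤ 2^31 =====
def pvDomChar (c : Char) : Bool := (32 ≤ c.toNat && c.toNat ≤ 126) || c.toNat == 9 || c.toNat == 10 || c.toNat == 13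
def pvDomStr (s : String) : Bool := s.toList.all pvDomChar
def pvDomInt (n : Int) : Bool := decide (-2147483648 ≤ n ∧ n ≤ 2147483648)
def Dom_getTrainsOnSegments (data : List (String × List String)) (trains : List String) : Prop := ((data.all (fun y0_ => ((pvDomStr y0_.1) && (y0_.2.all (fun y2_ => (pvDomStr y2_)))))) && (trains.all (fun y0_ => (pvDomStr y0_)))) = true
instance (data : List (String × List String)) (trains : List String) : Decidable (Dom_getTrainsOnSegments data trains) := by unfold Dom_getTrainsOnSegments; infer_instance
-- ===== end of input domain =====

-- B replaces A's index loop with its wrap branch by a structural recursion carrying the first station for the final wrap pair (alternative decomposition, same cost).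
-- ===== PORT A =====
-- A builds each segment string by index, with a special branch for the last index wrapping to route[0].
def getTrainsOnSegments (data : List (String × List String)) (trains : List String) : List String :=
  trains.foldl (fun trains_on_segments train =>
    let route : List String := (PySem.Dict.get? (PySem.Dict.mk data) train).getD []
    (PySem.List.pyRange 0 (PySem.List.len route)).foldl (fun trains_on_segments i =>
      let segment : String :=
        if i ≠ PySem.List.len route - 1 then
          if PySem.List.pyGetD route (i + 1) "" < PySem.List.pyGetD route i "" then
            PySem.List.pyGetD route (i + 1) "" ++ PySem.List.pyGetD route i ""
          else
            PySem.List.pyGetD route i "" ++ PySem.List.pyGetD route (i + 1) ""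
        else
          if PySem.List.pyGetD route 0 "" < PySem.List.pyGetD route i "" then
            PySem.List.pyGetD route 0 "" ++ PySem.List.pyGetD route i ""
          else
            PySem.List.pyGetD route i "" ++ PySem.List.pyGetD route 0 ""
      trains_on_segments ++ [train ++ segment]) trains_on_segments) []

-- ===== PORT B =====
-- B: recursive walk of each route, pairing head with successor; the saved first station supplies the wrap pair.
def pvWalk (train first : String) : List String → List String
  | [] => []
  | [a] => [train ++ (if a ≤ first then a ++ first else first ++ a)]
  | a :: b :: rest =>
      (train ++ (if a ≤ b then a ++ b else b ++ a)) :: pvWalk train first (b :: rest)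

def pvSegments (train : String) (route : List String) : List String :=
  match route with
  | [] => []
  | a :: _ => pvWalk train a route

def getTrainsOnSegments_alt (data : List (String × List String)) (trains : List String) : List String :=
  trains.flatMap (fun train =>
    pvSegments train ((PySem.Dict.get? (PySem.Dict.mk data) train).getD []))

-- ===== PRECONDITION & SPEC =====
-- Pre_ excludes exactly the inputs where some requested train is not a key of data:
-- there data.get(train) is None and Python A raises TypeError (len(None)); B raises KeyError (data[train]) there.
def Pre_getTrainsOnSegments (data : List (String × List String)) (trains : List String) : Prop :=
  ∀ t ∈ trains, (PySem.Dict.mk data).contains t = true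
instance (data : List (String × List String)) (trains : List String) : Decidable (Pre_getTrainsOnSegments data trains) := by unfold Pre_getTrainsOnSegments; infer_instance
def pvWitness_getTrainsOnSegments : (List (String × List String)) × List String :=
  ([("T1", ["a", "c", "b"]), ("T2", ["x"])], ["T1", "T2"])
def Spec_getTrainsOnSegments (data : List (String × List String)) (trains : List String) (out : List String) : Prop := out = getTrainsOnSegments_alt data trains
instance (data : List (String × List String)) (trains : List String) (out : List String) : Decidable (Spec_getTrainsOnSegments data trains out) := by unfold Spec_getTrainsOnSegments; infer_instance

-- ===== CLAIM (what is proved, stated in full; the proofs are below) =====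
def Claim_equal_getTrainsOnSegments : Prop := ∀ (data : List (String × List String)) (trains : List String), Dom_getTrainsOnSegments data trains → Pre_getTrainsOnSegments data trains → Spec_getTrainsOnSegments data trains (getTrainsOnSegments data trains)

-- ===== LEMMAS AND PROOFS =====

-- zip-with-rotation form of one route's segments equals B's recursive walk
theorem pv_zip_eq_walk (train first : String) (a : String) (rest : List String) :
    ((a :: rest).zip (rest ++ [first])).map
        (fun p => train ++ (if p.1 ≤ p.2 then p.1 ++ p.2 else p.2 ++ p.1))
    = pvWalk train first (a :: rest) := by
  induction rest generalizing a with
  | nil => simp [pvWalk]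
  | cons b rs ih =>
      simp only [List.cons_append, List.zip_cons_cons, List.map_cons, ih b, pvWalk]

-- one train's segments: A's indexed loop with the wrap branch equals the zip-with-rotation map
theorem pv_inner (train : String) (route : List String) (acc : List String) :
    (PySem.List.pyRange 0 (PySem.List.len route)).foldl (fun trains_on_segments i =>
      let segment : String :=
        if i ≠ PySem.List.len route - 1 then
          if PySem.List.pyGetD route (i + 1) "" < PySem.List.pyGetD route i "" then
            PySem.List.pyGetD route (i + 1) "" ++ PySem.List.pyGetD route i ""
          else
            PySem.List.pyGetD route i "" ++ PySem.List.pyGetD route (i + 1) ""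
        else
          if PySem.List.pyGetD route 0 "" < PySem.List.pyGetD route i "" then
            PySem.List.pyGetD route 0 "" ++ PySem.List.pyGetD route i ""
          else
            PySem.List.pyGetD route i "" ++ PySem.List.pyGetD route 0 ""
      trains_on_segments ++ [train ++ segment]) acc
    = acc ++ (route.zip (route.drop 1 ++ route.take 1)).map
        (fun p => train ++ (if p.1 ≤ p.2 then p.1 ++ p.2 else p.2 ++ p.1)) := by
  rw [PySem.List.foldl_append_singleton_eq_map]
  congr 1
  have hlen : PySem.List.len route = (route.length : Int) := rfl
  rw [hlen, PySem.List.pyRange_zero_natCast, List.map_map]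
  apply List.ext_getElem
  · simp only [List.length_map, List.length_range, List.length_zip, List.length_append,
      List.length_drop, List.length_take]
    omega
  · intro i h1 h2
    simp only [List.length_map, List.length_range] at h1
    simp only [List.getElem_map, List.getElem_range, Function.comp_apply, List.getElem_zip]
    have hn : i < route.length := h1
    have hget : ∀ (j : Nat) (hj : j < route.length), PySem.List.pyGetD route (j : Int) "" = route[j]'hj := by
      intro j hj
      rw [PySem.List.pyGetD_natCast, List.getD_eq_getElem _ _ hj]
    have hrot : (route.drop 1 ++ route.take 1)[i]'(by simp only [List.length_append, List.length_drop, List.length_take]; omega)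
        = if h : i + 1 < route.length then route[i + 1]'h else route[0]'(by omega) := by
      have hd : (route.drop 1).length = route.length - 1 := by
        simp only [List.length_drop]
      rw [List.getElem_append]
      split_ifs with h3 h4 h5
      · rw [List.getElem_drop]; congr 1; omega
      · omega
      · omega
      · have h0 : i - (route.drop 1).length = 0 := by
          simp only [List.length_drop]; omega
        simp only [h0, List.getElem_take]
    rw [hrot]
    by_cases hc : i + 1 < route.length
    · have hne : (i : Int) ≠ (route.length : Int) - 1 := by omega
      rw [if_pos hne, dif_pos hc]
      rw [show ((i : Int) + 1) = ((i + 1 : Nat) : Int) by push_cast; ring]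
      rw [hget i hn, hget (i + 1) hc]
      by_cases hle : route[i]'hn ≤ route[i + 1]'hc
      · rw [if_pos hle, if_neg (not_lt.mpr hle)]
      · rw [if_neg hle, if_pos (not_le.mp hle)]
    · have heq : ¬ ((i : Int) ≠ (route.length : Int) - 1) := by omega
      rw [if_neg heq, dif_neg hc]
      rw [hget i hn, show ((0 : Int)) = ((0 : Nat) : Int) from rfl, hget 0 (by omega)]
      by_cases hle : route[i]'hn ≤ route[0]'(by omega)
      · rw [if_pos hle, if_neg (not_lt.mpr hle)]
      · rw [if_neg hle, if_pos (not_le.mp hle)]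

-- combine: one train's A-loop equals B's pvSegments
theorem pv_inner_seg (train : String) (route : List String) (acc : List String) :
    (PySem.List.pyRange 0 (PySem.List.len route)).foldl (fun trains_on_segments i =>
      let segment : String :=
        if i ≠ PySem.List.len route - 1 then
          if PySem.List.pyGetD route (i + 1) "" < PySem.List.pyGetD route i "" then
            PySem.List.pyGetD route (i + 1) "" ++ PySem.List.pyGetD route i ""
          else
            PySem.List.pyGetD route i "" ++ PySem.List.pyGetD route (i + 1) ""
        else
          if PySem.List.pyGetD route 0 "" < PySem.List.pyGetD route i "" then
            PySem.List.pyGetD route 0 "" ++ PySem.List.pyGetD route i ""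
          else
            PySem.List.pyGetD route i "" ++ PySem.List.pyGetD route 0 ""
      trains_on_segments ++ [train ++ segment]) acc
    = acc ++ pvSegments train route := by
  rw [pv_inner]
  congr 1
  cases route with
  | nil => rfl
  | cons a rest =>
      simpa [pvSegments] using pv_zip_eq_walk train a a rest

-- ===== VERDICT (by name: the statement is the Claim_ definition above) =====
theorem getTrainsOnSegments_spec : Claim_equal_getTrainsOnSegments := by
  intro data trains _ _
  unfold Spec_getTrainsOnSegments
  have hflat : getTrainsOnSegments_alt data trains
      = [] ++ trains.flatMap (fun train =>
          pvSegments train ((PySem.Dict.get? (PySem.Dict.mk data) train).getD [])) := by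
    simp [getTrainsOnSegments_alt]
  rw [hflat, ← PySem.List.foldl_append_eq_flatMap]
  unfold getTrainsOnSegments
  apply PySem.List.foldl_congr_mem'
  intro train _ acc
  exact pv_inner_seg train _ acc
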